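-- pv_equiv track=rewrite | github.com/adqz/interview_practice | pathrise/10_min_substring.py | are_characters_in_string
-- ===== SOURCE A (Python) =====
-- from collections import Counter
--
-- def are_characters_in_string(S,T,s,e):
--     '''
--     Time: O((e-s) + m), m = len(T)
--     '''
--     char_counts = Counter(T)
--
--     for char in S[s:e]:
--         if char in char_counts and char_counts[char] > 0:
--             char_counts[char] -= 1
--
--     if sum(char_counts.values()) == 0:
--         return True
--
--     return False
-- ===== SOURCE B (Python) =====
-- def are_characters_in_string(S, T, s, e):
--     '''
--     Time: O(k * ((e-s) + m)), k = number of distinct chars of T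
--     '''
--     window = list(S[s:e])
--     target = list(T)
--     return all(window.count(ch) >= target.count(ch) for ch in set(target))
-- ===== Notes on version B (the rewrite author's own statement) =====
-- stated objective: alternative
-- what changed: Drops the Counter/dict entirely: B deduplicates T and, for each distinct character, compares a plain count of it in the window against its count in T, instead of A's decrement-a-Counter-while-scanning pass with a final sum-of-values test.
import Mathlib
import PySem

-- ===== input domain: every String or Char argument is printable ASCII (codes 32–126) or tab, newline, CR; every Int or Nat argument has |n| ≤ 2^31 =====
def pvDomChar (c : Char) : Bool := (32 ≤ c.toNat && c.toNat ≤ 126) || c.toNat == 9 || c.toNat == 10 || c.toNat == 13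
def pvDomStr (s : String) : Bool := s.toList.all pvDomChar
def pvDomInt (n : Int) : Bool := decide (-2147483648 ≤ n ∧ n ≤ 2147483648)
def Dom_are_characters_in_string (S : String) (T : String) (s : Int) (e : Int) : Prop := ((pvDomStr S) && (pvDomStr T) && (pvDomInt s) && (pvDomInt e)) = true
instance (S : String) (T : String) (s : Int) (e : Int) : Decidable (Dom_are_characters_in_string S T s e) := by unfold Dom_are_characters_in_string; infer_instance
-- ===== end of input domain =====

-- B drops the Counter entirely: it deduplicates T and compares per-distinct-character
-- counts of the window against T (objective: alternative decomposition, same result).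

-- ===== PORT A =====
-- the loop body: 'if char in char_counts and char_counts[char] > 0: char_counts[char] -= 1'
def pvStepA (d : PySem.Dict Char Int) (c : Char) : PySem.Dict Char Int :=
  if d.contains c && decide (0 < d.getD c 0) then d.modify c 0 (· - 1) else d

def are_characters_in_string (S : String) (T : String) (s : Int) (e : Int) : Bool :=
  let char_counts := PySem.Dict.counter T.toList           -- Counter(T)
  let final := (PySem.Str.slice S (some s) (some e)).toList.foldl pvStepA char_counts
  if final.values.sum = 0 then true else false

-- ===== PORT B =====
-- 'window = list(S[s:e]); target = list(T);
--  all(window.count(ch) >= target.count(ch) for ch in set(target))'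
def are_characters_in_string_alt (S : String) (T : String) (s : Int) (e : Int) : Bool :=
  let window := (PySem.Str.slice S (some s) (some e)).toList
  let target := T.toList
  (PySem.Set.ofList target).all (fun ch => decide (target.count ch ≤ window.count ch))

-- ===== PRECONDITION & SPEC =====
def Spec_are_characters_in_string (S : String) (T : String) (s : Int) (e : Int) (out : Bool) : Prop := out = are_characters_in_string_alt S T s e
instance (S : String) (T : String) (s : Int) (e : Int) (out : Bool) : Decidable (Spec_are_characters_in_string S T s e out) := by unfold Spec_are_characters_in_string; infer_instance

-- ===== CLAIM (what is proved, stated in full; the proofs are below) =====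
def Claim_equal_are_characters_in_string : Prop := ∀ (S : String) (T : String) (s : Int) (e : Int), Dom_are_characters_in_string S T s e → Spec_are_characters_in_string S T s e (are_characters_in_string S T s e)

-- ===== LEMMAS AND PROOFS =====

-- A's loop never changes the key set of the counter.
theorem pvStepA_keys (d : PySem.Dict Char Int) (c : Char) : (pvStepA d c).keys = d.keys := by
  unfold pvStepA
  split
  · next h =>
    rw [PySem.Dict.keys_modify, PySem.Dict.keys_insert_of_contains]
    simp only [Bool.and_eq_true] at h
    exact h.1
  · rfl

theorem pvFoldA_keys (l : List Char) (d : PySem.Dict Char Int) : (l.foldl pvStepA d).keys = d.keys := by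
  induction l generalizing d with
  | nil => rfl
  | cons x xs ih => simp [List.foldl_cons, ih, pvStepA_keys]

-- per-key value after A's loop: clamped subtraction of the window count
theorem pvFoldA_getD (l : List Char) (d : PySem.Dict Char Int) (c : Char)
    (h : 0 ≤ d.getD c 0) :
    (l.foldl pvStepA d).getD c 0 = max (d.getD c 0 - l.count c) 0 := by
  induction l generalizing d with
  | nil => simp; omega
  | cons x xs ih =>
    simp only [List.foldl_cons]
    by_cases hxc : x = c
    · subst hxc
      by_cases hpos : (0 : Int) < d.getD x 0
      · have hc : d.contains x = true := by
          by_contra hnc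
          rw [PySem.Dict.getD_of_not_contains d 0 (by simpa using hnc)] at hpos
          omega
        have hs : pvStepA d x = d.modify x 0 (· - 1) := by
          unfold pvStepA; rw [if_pos (by simp [hc, hpos])]
        rw [hs, ih _ (by rw [PySem.Dict.getD_modify_self]; omega),
          PySem.Dict.getD_modify_self, List.count_cons_self]
        push_cast
        omega
      · have hs : pvStepA d x = d := by
          unfold pvStepA; rw [if_neg (by simp [hpos])]
        rw [hs, ih _ h, List.count_cons_self]
        push_cast
        omega
    · have hne : c ≠ x := fun h' => hxc h'.symm
      have hstep : (pvStepA d x).getD c 0 = d.getD c 0 := by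
        unfold pvStepA
        split
        · rw [PySem.Dict.getD_modify, if_neg hne]
        · rfl
      rw [ih _ (by rw [hstep]; exact h), hstep]
      simp [hxc]

-- a sum of nonnegative integers is zero iff each is zero
theorem pvSumZero (l : List Int) (h : ∀ x ∈ l, 0 ≤ x) : l.sum = 0 ↔ ∀ x ∈ l, x = 0 := by
  induction l with
  | nil => simp
  | cons x xs ih =>
    have hx := h x (List.mem_cons_self ..)
    have hxs : ∀ y ∈ xs, 0 ≤ y := fun y hy => h y (List.mem_cons_of_mem _ hy)
    have hsum : 0 ≤ xs.sum := List.sum_nonneg hxs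
    simp only [List.sum_cons, List.mem_cons]
    constructor
    · intro h0
      have hx0 : x = 0 := by omega
      have : xs.sum = 0 := by omega
      exact fun y hy => hy.elim (fun h' => h' ▸ hx0) ((ih hxs).mp this y)
    · intro hall
      have hx0 : x = 0 := hall x (Or.inl rfl)
      have : xs.sum = 0 := (ih hxs).mpr (fun y hy => hall y (Or.inr hy))
      omega

-- both sides reduce to: every distinct character of T occurs in the window at least as often as in T
theorem pvBothChar (S T : String) (s e : Int) :
    are_characters_in_string S T s e = are_characters_in_string_alt S T s e := by
  unfold are_characters_in_string are_characters_in_string_alt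
  set W := (PySem.Str.slice S (some s) (some e)).toList with hW
  set ct := PySem.Dict.counter (κ := Char) T.toList with hct
  -- characterize A's side
  have hkeys : (W.foldl pvStepA ct).keys = ct.keys := pvFoldA_keys W ct
  have hnodup : (W.foldl pvStepA ct).keys.Nodup := by
    rw [hkeys]; exact PySem.Dict.nodup_keys_counter _
  have hvals := PySem.Dict.values_eq_map_keys (W.foldl pvStepA ct) hnodup 0
  have hgetD : ∀ c : Char, (W.foldl pvStepA ct).getD c 0
      = max ((ct.getD c 0) - W.count c) 0 := by
    intro c
    exact pvFoldA_getD W ct c (by rw [hct, PySem.Dict.getD_counter]; positivity)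
  have hnonneg : ∀ x ∈ (W.foldl pvStepA ct).values, 0 ≤ x := by
    intro x hx
    rw [hvals] at hx
    obtain ⟨k, _, rfl⟩ := List.mem_map.mp hx
    rw [hgetD k]; exact le_max_right _ _
  have hA : ((W.foldl pvStepA ct).values.sum = 0)
      ↔ ∀ c ∈ PySem.Set.ofList T.toList, T.toList.count c ≤ W.count c := by
    rw [pvSumZero _ hnonneg, hvals, hkeys, hct, PySem.Dict.keys_counter]
    constructor
    · intro h c hc
      have := h _ (List.mem_map.mpr ⟨c, hc, rfl⟩)
      rw [hgetD c, hct, PySem.Dict.getD_counter] at this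
      omega
    · intro h x hx
      obtain ⟨k, hk, rfl⟩ := List.mem_map.mp hx
      rw [hgetD k, hct, PySem.Dict.getD_counter]
      have := h k hk
      omega
  -- characterize B's side
  have hB : ((PySem.Set.ofList T.toList).all
        (fun ch => decide (T.toList.count ch ≤ W.count ch)) = true)
      ↔ ∀ c ∈ PySem.Set.ofList T.toList, T.toList.count c ≤ W.count c := by
    simp [List.all_eq_true]
  by_cases hz : (W.foldl pvStepA ct).values.sum = 0
  · rw [if_pos hz]
    exact (hB.mpr (hA.mp hz)).symm
  · rw [if_neg hz]
    by_contra hcon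
    refine hz (hA.mpr (hB.mp ?_))
    cases hb : (PySem.Set.ofList T.toList).all
        (fun ch => decide (T.toList.count ch ≤ W.count ch))
    · rw [hb] at hcon; exact absurd rfl hcon
    · rfl

-- ===== VERDICT (by name: the statement is the Claim_ definition above) =====
theorem are_characters_in_string_spec : Claim_equal_are_characters_in_string := by
  intro S T s e _
  unfold Spec_are_characters_in_string
  exact pvBothChar S T s e
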